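-- pv_equiv track=rewrite | github.com/PixelatedLatte/SATSolverProgram | SATClass.py | pickMostConstraining
-- ===== SOURCE A (Python) =====
-- def countLiteral(clauses):
--     count = {}
--     for clause in clauses:
--         for lit in clause:
--             v = abs(lit)
--             count[v] = count.get(v, 0) + 1
--     return count
--
-- def pickMostConstraining(clauses, assignment):
--     count = countLiteral(clauses)
--
--     bestLit = None
--     bestCount = -1
--     for lit, cnt in count.items():
--         if lit in assignment:
--             continue # Literal already assigned
--         if cnt > bestCount: # If found a better literal
--             bestCount = cnt
--             bestLit = lit
--     return bestLit # All variables assigned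
-- ===== SOURCE B (Python) =====
-- def pickMostConstraining(clauses, assignment):
--     count = {}
--     for clause in clauses:
--         for lit in clause:
--             v = abs(lit)
--             count[v] = count.get(v, 0) + 1
--     for v, cnt in sorted(count.items(), key=lambda kv: -kv[1]):
--         if v not in assignment:
--             return v
--     return None
-- ===== Notes on version B (the rewrite author's own statement) =====
-- stated objective: alternative
-- what changed: Replaces A's single-pass argmax scan with a -1 sentinel by stably sorting the count items in descending count order and returning the first unassigned variable in that order (stability reproduces A's strictly-greater tie-break).
import Mathlib
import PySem

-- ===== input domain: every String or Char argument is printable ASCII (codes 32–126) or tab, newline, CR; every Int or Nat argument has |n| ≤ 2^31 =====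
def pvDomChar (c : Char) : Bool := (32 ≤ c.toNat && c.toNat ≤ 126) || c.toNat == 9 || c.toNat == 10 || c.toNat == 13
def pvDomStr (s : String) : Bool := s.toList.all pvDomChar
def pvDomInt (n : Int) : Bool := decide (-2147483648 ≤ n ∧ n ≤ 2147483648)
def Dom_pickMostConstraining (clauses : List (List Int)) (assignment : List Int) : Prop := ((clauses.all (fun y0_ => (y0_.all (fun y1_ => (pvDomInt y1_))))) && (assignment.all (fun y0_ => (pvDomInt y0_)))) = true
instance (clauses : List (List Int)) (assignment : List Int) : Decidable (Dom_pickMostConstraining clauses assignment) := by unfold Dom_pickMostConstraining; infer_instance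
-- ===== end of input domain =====

-- B replaces A's single-pass argmax scan with a -1 sentinel by stably sorting the count items in
-- descending count order and returning the first unassigned variable in that order (alternative).

-- ===== PORT A =====
-- countLiteral: nested loop building the count dict
def countLiteral (clauses : List (List Int)) : PySem.Dict Int Int :=
  clauses.foldl
    (fun count clause =>
      clause.foldl (fun count lit => count.insert |lit| (count.getD |lit| 0 + 1)) count)
    PySem.Dict.empty

def pickMostConstraining (clauses : List (List Int)) (assignment : List Int) : Option Int :=
  let count := countLiteral clauses
  let st :=
    count.items.foldl
      (fun (st : Option Int × Int) kv =>
        if assignment.contains kv.1 then st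
        else if st.2 < kv.2 then (some kv.1, kv.2) else st)
      (none, -1)
  st.1

-- ===== PORT B =====
def pickMostConstraining_alt (clauses : List (List Int)) (assignment : List Int) : Option Int :=
  let count :=
    clauses.foldl
      (fun (count : PySem.Dict Int Int) clause =>
        clause.foldl (fun count lit => count.insert |lit| (count.getD |lit| 0 + 1)) count)
      PySem.Dict.empty
  -- 'for v, cnt in sorted(...): if v not in assignment: return v' / 'return None' → find? + map fst
  ((PySem.List.sorted count.items (fun kv => -kv.2)).find?
      (fun kv => !(assignment.contains kv.1))).map Prod.fst

-- ===== PRECONDITION & SPEC =====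
def Spec_pickMostConstraining (clauses : List (List Int)) (assignment : List Int) (out : Option Int) : Prop := out = pickMostConstraining_alt clauses assignment
instance (clauses : List (List Int)) (assignment : List Int) (out : Option Int) : Decidable (Spec_pickMostConstraining clauses assignment out) := by unfold Spec_pickMostConstraining; infer_instance

-- ===== CLAIM (what is proved, stated in full; the proofs are below) =====
def Claim_equal_pickMostConstraining : Prop := ∀ (clauses : List (List Int)) (assignment : List Int), Dom_pickMostConstraining clauses assignment → Spec_pickMostConstraining clauses assignment (pickMostConstraining clauses assignment)

-- ===== LEMMAS AND PROOFS =====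

-- A's nested counting loop is the counter of the flattened |·|-mapped literal list.
theorem countLiteral_eq_counter (clauses : List (List Int)) :
    countLiteral clauses
      = PySem.Dict.counter (clauses.flatMap (fun clause => clause.map (fun lit => |lit|))) := by
  rw [← PySem.Dict.foldl_insert_getD_add_one_eq_counter]
  unfold countLiteral
  rw [List.foldl_flatMap]
  simp [List.foldl_map]

-- the descending-count insertion order used by B's sort
def pvBefore (a b : Int × Int) : Bool := decide ((-a.2 : Int) < -b.2)

-- inserting an element the scan skips does not change the first hit
theorem find?_insertBy_skip (p : Int × Int → Bool) (x : Int × Int) (hx : p x = false) :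
    ∀ S : List (Int × Int),
      (PySem.List.insertBy pvBefore x S).find? p = S.find? p
  | [] => by simp [PySem.List.insertBy, hx]
  | y :: ys => by
    by_cases hb : pvBefore x y = true
    · simp [PySem.List.insertBy, hb, hx]
    · simp only [PySem.List.insertBy, hb]
      by_cases hy : p y = true
      · simp [List.find?, hy]
      · simp only [Bool.not_eq_true] at hy
        simp [List.find?, hy, find?_insertBy_skip p x hx ys]

-- a strictly better unassigned element becomes the first hit
theorem find?_insertBy_new (p : Int × Int → Bool) (x : Int × Int) (hx : p x = true) :
    ∀ S : List (Int × Int), S.Pairwise (fun a b => b.2 ≤ a.2) →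
      (∀ y ∈ S, p y = true → y.2 < x.2) →
      (PySem.List.insertBy pvBefore x S).find? p = some x
  | [], _, _ => by simp [PySem.List.insertBy, hx]
  | y :: ys, hpw, hlt => by
    by_cases hb : pvBefore x y = true
    · simp [PySem.List.insertBy, hb, hx]
    · have hy : p y = false := by
        by_contra h
        have := hlt y (by simp) (by simpa using h)
        simp only [pvBefore, decide_eq_true_eq] at hb
        omega
      simp only [PySem.List.insertBy]
      rw [if_neg hb, List.find?_cons_of_neg (by simp [hy])]
      exact find?_insertBy_new p x hx ys hpw.of_cons
        (fun z hz hpz => hlt z (by simp [hz]) hpz)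

-- an element no better than the current first hit leaves it first
theorem find?_insertBy_keep (p : Int × Int → Bool) (x m : Int × Int) :
    ∀ S : List (Int × Int), S.Pairwise (fun a b => b.2 ≤ a.2) →
      S.find? p = some m → x.2 ≤ m.2 →
      (PySem.List.insertBy pvBefore x S).find? p = some m
  | [], _, hfind, _ => by simp at hfind
  | y :: ys, hpw, hfind, hle => by
    by_cases hy : p y = true
    · have hm : y = m := by
        rw [List.find?_cons_of_pos hy] at hfind
        exact Option.some.inj hfind
      subst hm
      have hb : pvBefore x y = false := by
        simp only [pvBefore, decide_eq_false_iff_not]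
        omega
      simp [PySem.List.insertBy, hb, List.find?_cons_of_pos hy]
    · have hy' : p y = false := by simpa using hy
      rw [List.find?_cons_of_neg (by simp [hy'])] at hfind
      have hmys : m ∈ ys := List.mem_of_find?_eq_some hfind
      have hym : m.2 ≤ y.2 := List.rel_of_pairwise_cons hpw hmys
      have hb : pvBefore x y = false := by
        simp only [pvBefore, decide_eq_false_iff_not]
        omega
      simp only [PySem.List.insertBy]
      rw [if_neg (by simp [hb]), List.find?_cons_of_neg (by simp [hy'])]
      exact find?_insertBy_keep p x m ys hpw.of_cons hfind hle

-- the main invariant: A's (bestLit, bestCount) scan of xs equals the first unassigned element of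
-- the stable descending sort of xs (plus the facts needed to extend it by one element)
theorem scan_eq_sorted_find (assignment : List Int) :
    ∀ xs : List (Int × Int), (∀ kv ∈ xs, 0 ≤ kv.2) →
      (((PySem.List.sorted xs (fun kv => -kv.2)).find?
          (fun kv => !(assignment.contains kv.1))).map Prod.fst
        = (xs.foldl
            (fun (st : Option Int × Int) kv =>
              if assignment.contains kv.1 then st
              else if st.2 < kv.2 then (some kv.1, kv.2) else st)
            (none, -1)).1)
      ∧ ((PySem.List.sorted xs (fun kv => -kv.2)).find?
            (fun kv => !(assignment.contains kv.1)) = none →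
          (xs.foldl
            (fun (st : Option Int × Int) kv =>
              if assignment.contains kv.1 then st
              else if st.2 < kv.2 then (some kv.1, kv.2) else st)
            (none, -1)).2 = -1 ∧ ∀ kv ∈ xs, assignment.contains kv.1 = true)
      ∧ (∀ m, (PySem.List.sorted xs (fun kv => -kv.2)).find?
            (fun kv => !(assignment.contains kv.1)) = some m →
          (xs.foldl
            (fun (st : Option Int × Int) kv =>
              if assignment.contains kv.1 then st
              else if st.2 < kv.2 then (some kv.1, kv.2) else st)
            (none, -1)).2 = m.2
          ∧ ∀ kv ∈ xs, assignment.contains kv.1 = false → kv.2 ≤ m.2) := by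
  intro xs
  induction xs using List.reverseRecOn with
  | nil => intro _; refine ⟨rfl, by simp [PySem.List.sorted], by simp [PySem.List.sorted]⟩
  | append_singleton xs x ih =>
    intro h0
    have h0' : ∀ kv ∈ xs, 0 ≤ kv.2 := fun kv hkv => h0 kv (by simp [hkv])
    have hx0 : 0 ≤ x.2 := h0 x (by simp)
    obtain ⟨ih1, ih2, ih3⟩ := ih h0'
    have hpw : (PySem.List.sorted xs (fun kv => -kv.2)).Pairwise (fun a b => b.2 ≤ a.2) := by
      have := PySem.List.sorted_pairwise xs (fun kv => -kv.2)
      exact this.imp (by intro a b h; omega)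
    have hsort : PySem.List.sorted (xs ++ [x]) (fun kv : Int × Int => -kv.2)
        = PySem.List.insertBy pvBefore x (PySem.List.sorted xs (fun kv => -kv.2)) := by
      rw [PySem.List.sorted_eq_foldl_insertBy, List.foldl_append,
        ← PySem.List.sorted_eq_foldl_insertBy]
      rfl
    rw [hsort, List.foldl_append]
    simp only [List.foldl_cons, List.foldl_nil]
    set F := xs.foldl
      (fun (st : Option Int × Int) kv =>
        if assignment.contains kv.1 then st
        else if st.2 < kv.2 then (some kv.1, kv.2) else st)
      (none, -1) with hF
    by_cases hq : assignment.contains x.1 = true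
    · have hmem : x.1 ∈ assignment := by simpa using hq
      rw [if_pos hq]
      have hpx : (fun kv : Int × Int => !(assignment.contains kv.1)) x = false := by simp [hmem]
      rw [find?_insertBy_skip _ x hpx]
      refine ⟨ih1, ?_, ?_⟩
      · intro hn
        obtain ⟨ha, hb⟩ := ih2 hn
        refine ⟨ha, ?_⟩
        intro kv hkv
        rcases List.mem_append.mp hkv with h | h
        · exact hb kv h
        · simp at h; subst h; exact hq
      · intro m hm
        obtain ⟨ha, hb⟩ := ih3 m hm
        refine ⟨ha, ?_⟩
        intro kv hkv hkv2
        rcases List.mem_append.mp hkv with h | h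
        · exact hb kv h hkv2
        · simp at h; subst h; rw [hq] at hkv2; cases hkv2
    · have hq' : assignment.contains x.1 = false := by simpa using hq
      have hnmem : x.1 ∉ assignment := by simpa using hq'
      rw [if_neg hq]
      have hpx : (fun kv : Int × Int => !(assignment.contains kv.1)) x = true := by simp [hnmem]
      cases hfind : (PySem.List.sorted xs (fun kv => -kv.2)).find?
          (fun kv => !(assignment.contains kv.1)) with
      | none =>
        obtain ⟨ha, hb⟩ := ih2 hfind
        have hnew : (PySem.List.insertBy pvBefore x
            (PySem.List.sorted xs (fun kv => -kv.2))).find?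
              (fun kv => !(assignment.contains kv.1)) = some x := by
          apply find?_insertBy_new _ x hpx _ hpw
          intro y hy hpy
          have hmem : y ∈ xs := (PySem.List.mem_sorted _ _ _ _).mp hy
          rw [hb y hmem] at hpy; cases hpy
        have hlt : F.2 < x.2 := by omega
        rw [if_pos hlt, hnew]
        refine ⟨rfl, ?_, ?_⟩
        · intro hn; cases hn
        · intro m hm
          have hm' : m = x := by injection hm with h; exact h.symm
          subst hm'
          refine ⟨rfl, ?_⟩
          intro kv hkv hkv2
          rcases List.mem_append.mp hkv with h | h
          · rw [hb kv h] at hkv2; cases hkv2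
          · simp at h; subst h; omega
      | some m =>
        obtain ⟨ha, hb⟩ := ih3 m hfind
        by_cases hlt : m.2 < x.2
        · have hnew : (PySem.List.insertBy pvBefore x
              (PySem.List.sorted xs (fun kv => -kv.2))).find?
                (fun kv => !(assignment.contains kv.1)) = some x := by
            apply find?_insertBy_new _ x hpx _ hpw
            intro y hy hpy
            have hmem : y ∈ xs := (PySem.List.mem_sorted _ _ _ _).mp hy
            have := hb y hmem (by simpa using hpy)
            omega
          have hltF : F.2 < x.2 := by omega
          rw [if_pos hltF, hnew]
          refine ⟨rfl, ?_, ?_⟩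
          · intro hn; cases hn
          · intro m' hm'
            have : m' = x := by injection hm' with h; exact h.symm
            subst this
            refine ⟨rfl, ?_⟩
            intro kv hkv hkv2
            rcases List.mem_append.mp hkv with h | h
            · have := hb kv h hkv2; omega
            · simp at h; subst h; omega
        · have hle : x.2 ≤ m.2 := by omega
          have hkeep : (PySem.List.insertBy pvBefore x
              (PySem.List.sorted xs (fun kv => -kv.2))).find?
                (fun kv => !(assignment.contains kv.1)) = some m :=
            find?_insertBy_keep _ x m _ hpw hfind hle
          have hnltF : ¬ F.2 < x.2 := by omega
          rw [if_neg hnltF, hkeep]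
          rw [hfind] at ih1
          refine ⟨ih1, ?_, ?_⟩
          · intro hn; cases hn
          · intro m' hm'
            have : m' = m := by injection hm' with h; exact h.symm
            subst this
            refine ⟨ha, ?_⟩
            intro kv hkv hkv2
            rcases List.mem_append.mp hkv with h | h
            · exact hb kv h hkv2
            · simp at h; subst h; omega

-- ===== VERDICT (by name: the statement is the Claim_ definition above) =====
theorem pickMostConstraining_spec : Claim_equal_pickMostConstraining := by
  intro clauses assignment _
  unfold Spec_pickMostConstraining pickMostConstraining pickMostConstraining_alt
  dsimp only
  have h0 : ∀ kv ∈ (countLiteral clauses).items, 0 ≤ kv.2 := by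
    rw [countLiteral_eq_counter, PySem.Dict.items_counter]
    intro kv hkv
    simp only [List.mem_map] at hkv
    obtain ⟨k, _, hk⟩ := hkv
    subst hk
    exact Int.natCast_nonneg _
  have H := (scan_eq_sorted_find assignment (countLiteral clauses).items h0).1
  rw [← H]
  rfl
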